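-- pv_equiv track=rewrite | github.com/NihaoRay/TS-Finder | crawler_model/group_features.py | check_index_list
-- ===== SOURCE A (Python) =====
-- def check_index_list(item, referer_list, resource_list):
--     assert len(referer_list) == len(resource_list)
--     item = str(item)
--
--     ret_referer_list = []
--     ret_referer_index_list = []
--     ret_resource_list = []
--     for i, source in enumerate(referer_list):
--         if item != '/' and item in source:
--             ret_referer_list.append(source)
--             ret_referer_index_list.append(i)
--             ret_resource_list.append(resource_list[i])
--     return ret_referer_list, ret_referer_index_list, ret_resource_list
-- ===== SOURCE B (Python) =====
-- def check_index_list(item, referer_list, resource_list):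
--     assert len(referer_list) == len(resource_list)
--     item = str(item)
--     if item == '/':
--         return [], [], []
--     stack = []
--     for i in range(len(referer_list) - 1, -1, -1):
--         if item in referer_list[i]:
--             stack.append((referer_list[i], i, resource_list[i]))
--     ret_referer, ret_index, ret_resource = [], [], []
--     while stack:
--         r, i, s = stack.pop()
--         ret_referer.append(r)
--         ret_index.append(i)
--         ret_resource.append(s)
--     return ret_referer, ret_index, ret_resource
-- ===== Notes on version B (the rewrite author's own statement) =====
-- stated objective: alternative
-- what changed: B handles the '/' key by an early return, then scans the lists BACKWARDS pushing matched (referer, index, resource) triples onto a stack, and finally drains the stack with pop() to emit the three outputs in forward order, instead of A's single forward loop appending to three parallel lists.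
import Mathlib
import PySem

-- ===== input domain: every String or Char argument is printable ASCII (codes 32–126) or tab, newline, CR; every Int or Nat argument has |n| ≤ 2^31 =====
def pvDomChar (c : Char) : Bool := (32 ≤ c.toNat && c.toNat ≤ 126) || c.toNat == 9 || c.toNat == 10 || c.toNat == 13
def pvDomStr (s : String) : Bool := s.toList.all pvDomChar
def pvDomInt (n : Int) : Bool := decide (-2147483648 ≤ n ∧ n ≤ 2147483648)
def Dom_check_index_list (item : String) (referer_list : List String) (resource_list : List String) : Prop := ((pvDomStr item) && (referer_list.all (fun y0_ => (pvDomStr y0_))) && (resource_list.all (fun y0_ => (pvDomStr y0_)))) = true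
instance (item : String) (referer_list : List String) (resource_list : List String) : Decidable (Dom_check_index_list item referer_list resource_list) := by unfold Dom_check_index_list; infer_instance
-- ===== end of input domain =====

-- B: early return for '/', then a BACKWARD scan pushing matched triples onto a stack,
-- then a drain phase popping the stack to emit the outputs (objective: alternative, same cost).

-- ===== PORT A =====
-- A: one forward loop over enumerate(referer_list) appending to three accumulator lists.
def check_index_list (item : String) (referer_list : List String) (resource_list : List String) : List String × List Int × List String :=
  (PySem.List.enumerate referer_list 0).foldl
    (fun acc p =>
      if (!(item == "/") && PySem.Str.isIn item p.2) = true then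
        (acc.1 ++ [p.2], acc.2.1 ++ [p.1], acc.2.2 ++ [PySem.List.pyGetD resource_list p.1 ""])
      else acc)
    ([], [], [])

-- ===== PORT B =====
-- the loop body: if item in referer_list[i]: stack.append((referer_list[i], i, resource_list[i]))
def pvPushTriple (item : String) (referer_list resource_list : List String)
    (st : List (String × Int × String)) (i : Int) : List (String × Int × String) :=
  if PySem.Str.isIn item (PySem.List.pyGetD referer_list i "") = true then
    st ++ [(PySem.List.pyGetD referer_list i "", i, PySem.List.pyGetD resource_list i "")]
  else st

-- the while-loop: pop the last stack element and append its fields to the three outputs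
def pvDrain (st : List (String × Int × String)) (acc : List String × List Int × List String) :
    List String × List Int × List String :=
  if h : st = [] then acc
  else
    pvDrain st.dropLast
      (acc.1 ++ [(st.getLast h).1], acc.2.1 ++ [(st.getLast h).2.1], acc.2.2 ++ [(st.getLast h).2.2])
termination_by st.length
decreasing_by simpa [List.length_dropLast] using Nat.sub_lt (List.length_pos_iff.mpr h) Nat.one_pos

def check_index_list_alt (item : String) (referer_list : List String) (resource_list : List String) : List String × List Int × List String :=
  if item == "/" then ([], [], [])
  else
    pvDrain
      ((PySem.List.pyRange ((referer_list.length : Int) - 1) (-1) (-1)).foldl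
        (pvPushTriple item referer_list resource_list) [])
      ([], [], [])

-- ===== PRECONDITION & SPEC =====
-- Pre_ excludes exactly the inputs where A's assert raises AssertionError (unequal lengths).
def Pre_check_index_list (item : String) (referer_list : List String) (resource_list : List String) : Prop :=
  referer_list.length = resource_list.length
instance (item : String) (referer_list : List String) (resource_list : List String) : Decidable (Pre_check_index_list item referer_list resource_list) := by unfold Pre_check_index_list; infer_instance

def pvWitness_check_index_list : String × List String × List String := ("a", ["bab", "c", "/a"], ["r1", "r2", "r3"])

def Spec_check_index_list (item : String) (referer_list : List String) (resource_list : List String) (out : List String × List Int × List String) : Prop := out = check_index_list_alt item referer_list resource_list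
instance (item : String) (referer_list : List String) (resource_list : List String) (out : List String × List Int × List String) : Decidable (Spec_check_index_list item referer_list resource_list out) := by unfold Spec_check_index_list; infer_instance

-- ===== CLAIM (what is proved, stated in full; the proofs are below) =====
def Claim_equal_check_index_list : Prop := ∀ (item : String) (referer_list : List String) (resource_list : List String), Dom_check_index_list item referer_list resource_list → Pre_check_index_list item referer_list resource_list → Spec_check_index_list item referer_list resource_list (check_index_list item referer_list resource_list)

-- ===== LEMMAS AND PROOFS =====

-- A's loop with arbitrary accumulators equals append of filter-maps over the enumerated list.
theorem check_index_list_foldA (item : String) (resource_list : List String)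
    (l : List (Int × String)) :
    ∀ (a : List String) (b : List Int) (c : List String),
      l.foldl
        (fun acc p =>
          if (!(item == "/") && PySem.Str.isIn item p.2) = true then
            (acc.1 ++ [p.2], acc.2.1 ++ [p.1], acc.2.2 ++ [PySem.List.pyGetD resource_list p.1 ""])
          else acc)
        (a, b, c)
      = (a ++ (l.filter (fun p => !(item == "/") && PySem.Str.isIn item p.2)).map (fun p => p.2),
         b ++ (l.filter (fun p => !(item == "/") && PySem.Str.isIn item p.2)).map (fun p => p.1),
         c ++ (l.filter (fun p => !(item == "/") && PySem.Str.isIn item p.2)).map (fun p => PySem.List.pyGetD resource_list p.1 "")) := by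
  induction l with
  | nil => intro a b c; simp
  | cons p t ih =>
    intro a b c
    rw [List.foldl_cons, List.filter_cons]
    by_cases h : (!(item == "/") && PySem.Str.isIn item p.2) = true
    · rw [if_pos h, if_pos h, ih]; simp
    · rw [if_neg h, if_neg h, ih]

-- draining the stack emits its elements from the top, i.e. in reverse stack order
theorem pvDrain_eq (st : List (String × Int × String)) :
    ∀ (a : List String) (b : List Int) (c : List String),
      pvDrain st (a, b, c)
        = (a ++ st.reverse.map (·.1), b ++ st.reverse.map (·.2.1), c ++ st.reverse.map (·.2.2)) := by
  induction st using List.reverseRecOn with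
  | nil => intro a b c; rw [pvDrain.eq_def]; simp
  | append_singleton xs x ih =>
    intro a b c
    rw [pvDrain.eq_def]
    simp only [List.append_ne_nil_of_right_ne_nil _ (by simp : ([x] : List _) ≠ []), dite_false,
      List.dropLast_concat, List.getLast_append_singleton, ih]
    simp

-- ===== VERDICT (by name: the statement is the Claim_ definition above) =====
theorem check_index_list_spec : Claim_equal_check_index_list := by
  intro item referer_list resource_list _ _
  unfold Spec_check_index_list check_index_list check_index_list_alt
  rw [check_index_list_foldA]
  by_cases hsl : item = "/"
  · simp [hsl]
  · have hb : (item == "/") = false := by simpa using hsl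
    rw [PySem.List.pyRange_neg_one_eq_reverse]
    have h0 : ((-1 : Int) + 1) = 0 := by norm_num
    have h1 : ((referer_list.length : Int) - 1 + 1) = (referer_list.length : Int) := by ring
    rw [h0, h1]
    have hstack :
        (((PySem.List.pyRange 0 (referer_list.length : Int) 1).reverse).foldl
          (pvPushTriple item referer_list resource_list) [])
        = (((PySem.List.pyRange 0 (referer_list.length : Int) 1).reverse.filter
              (fun i => PySem.Str.isIn item (PySem.List.pyGetD referer_list i ""))).map
            (fun i => (PySem.List.pyGetD referer_list i "", i, PySem.List.pyGetD resource_list i ""))) := by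
      simpa [pvPushTriple] using
        (PySem.List.foldl_append_if
          (p := fun i => PySem.Str.isIn item (PySem.List.pyGetD referer_list i ""))
          (f := fun i => (PySem.List.pyGetD referer_list i "", i, PySem.List.pyGetD resource_list i ""))
          (l := (PySem.List.pyRange 0 (referer_list.length : Int) 1).reverse) (acc := []))
    rw [hstack, pvDrain_eq]
    rw [PySem.List.enumerate_eq_map_pyRange (d := "")]
    simp [hb, List.filter_map, List.map_map, Function.comp_def]
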